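-- pv_equiv track=rewrite | github.com/arifseyda/TakeInfoatNistforICS | NistData/main.py | tupple_to_array
-- ===== SOURCE A (Python) =====
-- def tupple_to_array(tupple,number):
--     result = []
--     array = []
--     for s in tupple:
--         for x in s:
--             result.append(x)
--             array = [result[i * number:(i+1) * number] for i in range((len(result)+ number -1) // number)]
--     return array
-- ===== SOURCE B (Python) =====
-- def tupple_to_array(tupple, number):
--     flat = [x for s in tupple for x in s]
--     return [flat[i:i + number] for i in range(0, len(flat), number)]
-- ===== Notes on version B (the rewrite author's own statement) =====
-- stated objective: faster
-- what changed: B flattens once and builds the chunk list a single time with range(0, len, number), instead of A's rebuilding of the whole chunk list from scratch after every appended element (a quadratic comprehension inside the inner loop).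
-- intended difference: For negative number with exactly one flattened element A returns [[]] (an accidental empty chunk from its ceiling-division formula), while B returns [] as it does for every other negative chunk size; no chunks is the intended result for a non-positive chunk size. — e.g. on tupple_to_array([[1]], -1): A returns [[]], B returns []
-- outside the precondition, e.g. on tupple_to_array([], 0): A returns [], B raises ValueError
import Mathlib
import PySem

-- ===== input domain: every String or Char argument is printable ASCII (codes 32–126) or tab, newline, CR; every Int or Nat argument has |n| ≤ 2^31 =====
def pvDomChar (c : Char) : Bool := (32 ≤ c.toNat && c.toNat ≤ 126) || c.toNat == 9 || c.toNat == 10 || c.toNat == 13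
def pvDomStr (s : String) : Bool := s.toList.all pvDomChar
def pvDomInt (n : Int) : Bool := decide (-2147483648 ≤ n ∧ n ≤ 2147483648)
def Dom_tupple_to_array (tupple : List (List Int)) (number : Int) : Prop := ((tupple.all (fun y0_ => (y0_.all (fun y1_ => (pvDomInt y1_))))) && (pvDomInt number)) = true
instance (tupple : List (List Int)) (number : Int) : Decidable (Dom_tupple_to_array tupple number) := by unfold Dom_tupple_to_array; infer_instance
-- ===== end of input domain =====

-- B flattens once and chunks once (O(n)); A rebuilds the whole chunk list after every element (O(n^2)).

-- ===== PORT A =====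
def tupple_to_array (tupple : List (List Int)) (number : Int) : List (List Int) :=
  (tupple.foldl
    (fun (st : List Int × List (List Int)) s =>
      s.foldl
        (fun (st : List Int × List (List Int)) x =>
          let result := st.1 ++ [x]
          (result,
            (PySem.List.pyRange 0
                (PySem.Int.floordiv ((result.length : Int) + number - 1) number) 1).map
              (fun i => PySem.List.slice result (some (i * number)) (some ((i + 1) * number)))))
        st)
    ([], [])).2

-- ===== PORT B =====
def tupple_to_array_alt (tupple : List (List Int)) (number : Int) : List (List Int) :=
  let flat := tupple.flatMap (fun s => s)
  (PySem.List.pyRange 0 (flat.length : Int) number).map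
    (fun i => PySem.List.slice flat (some i) (some (i + number)))

-- ===== PRECONDITION & SPEC =====
-- Pre_ excludes number == 0: there A raises ZeroDivisionError as soon as any element exists,
-- and on the vacuous empty input it returns [] only by accident while B's range(0, 0, 0) raises ValueError.
def Pre_tupple_to_array (tupple : List (List Int)) (number : Int) : Prop := number ≠ 0
instance (tupple : List (List Int)) (number : Int) : Decidable (Pre_tupple_to_array tupple number) := by
  unfold Pre_tupple_to_array; infer_instance

def pvWitness_tupple_to_array : List (List Int) × Int := ([[1, 2], [3]], 2)

-- For negative number with exactly one flattened element A returns [[]] (an accidental empty chunk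
-- from its ceiling-division formula), while B returns [] as for every other negative chunk size;
-- no chunks is the intended result for a non-positive chunk size.
def D_tupple_to_array (tupple : List (List Int)) (number : Int) : Prop :=
  number < 0 ∧ (tupple.map (fun s => s.length)).sum = 1
instance (tupple : List (List Int)) (number : Int) : Decidable (D_tupple_to_array tupple number) := by
  unfold D_tupple_to_array; infer_instance

def Spec_tupple_to_array (tupple : List (List Int)) (number : Int) (out : List (List Int)) : Prop :=
  ¬ D_tupple_to_array tupple number → out = tupple_to_array_alt tupple number
instance (tupple : List (List Int)) (number : Int) (out : List (List Int)) : Decidable (Spec_tupple_to_array tupple number out) := by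
  unfold Spec_tupple_to_array; infer_instance

def pvDiffWitness_tupple_to_array : List (List Int) × Int := ([[1]], -1)
def pvDiffWitnessOut_tupple_to_array : (List (List Int)) × (List (List Int)) := ([[]], [])

-- ===== CLAIM (what is proved, stated in full; the proofs are below) =====
def Claim_unchanged_tupple_to_array : Prop := ∀ (tupple : List (List Int)) (number : Int), Dom_tupple_to_array tupple number → Pre_tupple_to_array tupple number → Spec_tupple_to_array tupple number (tupple_to_array tupple number)
def Claim_changed_tupple_to_array : Prop := Dom_tupple_to_array (pvDiffWitness_tupple_to_array.1) (pvDiffWitness_tupple_to_array.2) ∧ Pre_tupple_to_array (pvDiffWitness_tupple_to_array.1) (pvDiffWitness_tupple_to_array.2) ∧ D_tupple_to_array (pvDiffWitness_tupple_to_array.1) (pvDiffWitness_tupple_to_array.2) ∧ tupple_to_array (pvDiffWitness_tupple_to_array.1) (pvDiffWitness_tupple_to_array.2) = pvDiffWitnessOut_tupple_to_array.1 ∧ tupple_to_array_alt (pvDiffWitness_tupple_to_array.1) (pvDiffWitness_tupple_to_array.2) = pvDiffWitnessOut_tupple_to_array.2 ∧ pvDiffWitnessOut_tupple_to_array.1 ≠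 pvDiffWitnessOut_tupple_to_array.2
def Claim_exact_tupple_to_array : Prop := ∀ (tupple : List (List Int)) (number : Int), Dom_tupple_to_array tupple number → Pre_tupple_to_array tupple number → D_tupple_to_array tupple number → tupple_to_array tupple number ≠ tupple_to_array_alt tupple number

-- ===== LEMMAS AND PROOFS =====

-- A's chunking of a list l: [l[i*n:(i+1)*n] for i in range((len(l)+n-1)//n)]
def chunkA (l : List Int) (n : Int) : List (List Int) :=
  (PySem.List.pyRange 0 (PySem.Int.floordiv ((l.length : Int) + n - 1) n) 1).map
    (fun i => PySem.List.slice l (some (i * n)) (some ((i + 1) * n)))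

-- B's chunking of a list l: [l[i:i+n] for i in range(0, len(l), n)]
def chunkB (l : List Int) (n : Int) : List (List Int) :=
  (PySem.List.pyRange 0 (l.length : Int) n).map
    (fun i => PySem.List.slice l (some i) (some (i + n)))

lemma portA_eq (t : List (List Int)) (n : Int) :
    tupple_to_array t n =
      (t.foldl
        (fun (st : List Int × List (List Int)) s =>
          s.foldl (fun (st : List Int × List (List Int)) x =>
            (st.1 ++ [x], chunkA (st.1 ++ [x]) n)) st)
        ([], [])).2 := rfl

lemma portB_eq (t : List (List Int)) (n : Int) :
    tupple_to_array_alt t n = chunkB t.flatten n := by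
  simp [tupple_to_array_alt, chunkB, List.flatMap_def]

lemma innerA (n : Int) (s : List Int) : ∀ (r : List Int) (a : List (List Int)),
    s.foldl (fun (st : List Int × List (List Int)) x =>
      (st.1 ++ [x], chunkA (st.1 ++ [x]) n)) (r, a)
    = (r ++ s, if s = [] then a else chunkA (r ++ s) n) := by
  induction s with
  | nil => intro r a; simp
  | cons x s ih =>
    intro r a
    simp only [List.foldl_cons, ih (r ++ [x]) (chunkA (r ++ [x]) n)]
    by_cases hs : s = [] <;> simp [hs]

lemma outerA (n : Int) (t : List (List Int)) : ∀ (r : List Int) (a : List (List Int)),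
    t.foldl
      (fun (st : List Int × List (List Int)) s =>
        s.foldl (fun (st : List Int × List (List Int)) x =>
          (st.1 ++ [x], chunkA (st.1 ++ [x]) n)) st)
      (r, a)
    = (r ++ t.flatten, if t.flatten = [] then a else chunkA (r ++ t.flatten) n) := by
  induction t with
  | nil => intro r a; simp
  | cons s t ih =>
    intro r a
    simp only [List.foldl_cons, innerA n s r a, ih]
    by_cases hs : s = [] <;> by_cases ht : t.flatten = [] <;>
      simp [hs, ht, List.append_assoc]

lemma A_char (t : List (List Int)) (n : Int) :
    tupple_to_array t n = if t.flatten = [] then [] else chunkA t.flatten n := by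
  rw [portA_eq, outerA n t [] []]
  by_cases h : t.flatten = [] <;> simp [h]

lemma pyRange_nil_of_neg (a b s : Int) (hs : s < 0) (hab : a ≤ b) :
    PySem.List.pyRange a b s = [] := by
  simp only [PySem.List.pyRange]
  rw [if_neg (by omega), if_neg (by omega), if_neg (by omega)]
  simp

lemma chunkB_nil (n : Int) : chunkB [] n = [] := by
  rcases lt_trichotomy n 0 with h | h | h
  · simp [chunkB, pyRange_nil_of_neg 0 0 n h le_rfl]
  · simp [chunkB, h, PySem.List.pyRange]
  · simp [chunkB, PySem.List.pyRange_of_pos 0 0 h]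

lemma chunkA_eq_chunkB_of_pos (l : List Int) (n : Int) (hn : 0 < n) :
    chunkA l n = chunkB l n := by
  have hfd : PySem.Int.floordiv ((l.length : Int) + n - 1) n = ((l.length : Int) + n - 1) / n := by
    rw [PySem.Int.floordiv, Int.fdiv_eq_ediv, if_pos (Or.inl (by omega : (0:Int) ≤ n))]
    exact sub_zero _
  have hc : ((((l.length : Int)) + n - 1) / n - 0).toNat
      = if (0 : Int) < (l.length : Int) then (((l.length : Int) - 0 + n - 1) / n).toNat else 0 := by
    by_cases hl : (0 : Int) < (l.length : Int)
    · rw [if_pos hl]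
      have e : (l.length : Int) - 0 + n - 1 = (l.length : Int) + n - 1 := by ring
      rw [Int.sub_zero, e]
    · rw [if_neg hl]
      have h0 : ((l.length : Int) + n - 1) / n = 0 :=
        Int.ediv_eq_zero_of_lt (by omega) (by omega)
      rw [Int.sub_zero, h0]
      rfl
  rw [chunkA, chunkB, PySem.List.pyRange_one, PySem.List.pyRange_of_pos 0 (l.length : Int) hn, hfd,
    hc, List.map_map, List.map_map]
  apply List.map_congr_left
  intro k _
  have e1 : (((0 : Int) + (k : Int)) * n) = 0 + n * (k : Int) := by ring
  have e2 : (((0 : Int) + (k : Int) + 1) * n) = 0 + n * (k : Int) + n := by ring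
  simp only [Function.comp_apply, e1, e2]

lemma fdiv_nonpos_of_neg (a n : Int) (hn : n < 0) (ha : n < a) :
    PySem.Int.floordiv a n ≤ 0 := by
  have h1 : PySem.Int.floordiv a n = (-a) / (-n) := by
    rw [← PySem.Int.floordiv_neg_neg a n, PySem.Int.floordiv, Int.fdiv_eq_ediv,
      if_pos (Or.inl (by omega : (0:Int) ≤ -n))]
    exact sub_zero _
  rw [h1]
  by_cases hpos : 0 < -a
  · exact le_of_eq (Int.ediv_eq_zero_of_lt (by omega) (by omega))
  · have := Int.ediv_le_ediv (by omega : (0:Int) < -n) (by omega : -a ≤ 0)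
    simpa using this

lemma chunkA_nil_of_neg (l : List Int) (n : Int) (hn : n < 0) (hl : 2 ≤ l.length) :
    chunkA l n = [] := by
  have h := fdiv_nonpos_of_neg ((l.length : Int) + n - 1) n hn (by omega)
  simp [chunkA, PySem.List.pyRange_one_eq_nil h]

theorem tupple_to_array_spec_aux (t : List (List Int)) (n : Int)
    (hpre : n ≠ 0) (hnd : ¬ D_tupple_to_array t n) :
    tupple_to_array t n = tupple_to_array_alt t n := by
  rw [A_char, portB_eq]
  by_cases hflat : t.flatten = []
  · simp [hflat, chunkB_nil]
  · rw [if_neg hflat]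
    rcases lt_or_gt_of_ne hpre with hn | hn
    · have hlen : (t.map (fun s => s.length)).sum = t.flatten.length := by
        simp [List.length_flatten]
      have hne1 : t.flatten.length ≠ 1 := fun h1 => hnd ⟨hn, by omega⟩
      have hne0 : t.flatten.length ≠ 0 := fun h0 =>
        hflat (List.length_eq_zero_iff.mp h0)
      have h2 : 2 ≤ t.flatten.length := by omega
      rw [chunkA_nil_of_neg _ n hn h2, chunkB,
        pyRange_nil_of_neg 0 (t.flatten.length : Int) n hn (by positivity)]
      simp
    · exact chunkA_eq_chunkB_of_pos _ n hn

theorem tight_aux (t : List (List Int)) (n : Int)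
    (hn : n < 0) (h1 : (t.map (fun s => s.length)).sum = 1) :
    tupple_to_array t n ≠ tupple_to_array_alt t n := by
  have hlen : t.flatten.length = 1 := by
    simpa [List.length_flatten] using h1
  obtain ⟨x, hx⟩ := List.length_eq_one_iff.mp hlen
  have hflat : t.flatten ≠ [] := by simp [hx]
  have hB : tupple_to_array_alt t n = [] := by
    rw [portB_eq, chunkB, pyRange_nil_of_neg 0 (t.flatten.length : Int) n hn (by positivity)]
    simp
  have hm : PySem.Int.floordiv ((t.flatten.length : Int) + n - 1) n = 1 := by
    rw [hlen]
    show PySem.Int.floordiv ((1 : Int) + n - 1) n = 1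
    have : (1 : Int) + n - 1 = n := by ring
    rw [this]
    simp [PySem.Int.floordiv, Int.fdiv_self (by omega : n ≠ 0)]
  have hsl : PySem.List.slice t.flatten (some ((0 : Int) * n)) (some (((0 : Int) + 1) * n)) = [] := by
    obtain ⟨k, hk, hkn⟩ : ∃ k : Nat, 0 < k ∧ n = -(k : Int) :=
      ⟨(-n).toNat, by omega, by omega⟩
    have : ((0 : Int) + 1) * n = n := by ring
    rw [this, (by ring : (0 : Int) * n = 0), PySem.List.slice_zero_start, hkn,
      PySem.List.slice_to_neg_natCast t.flatten k hk, hx]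
    simp [Nat.sub_eq_zero_of_le hk]
  have hr : PySem.List.pyRange 0 1 1 = [0] := by decide
  have hA : tupple_to_array t n = [[]] := by
    rw [A_char, if_neg hflat, chunkA, hm, hr]
    simp only [List.map_cons, List.map_nil, hsl]
  rw [hA, hB]
  simp

-- ===== VERDICT (by name: the statement is the Claim_ definition above) =====
theorem tupple_to_array_spec : Claim_unchanged_tupple_to_array := by
  intro t n _ hpre hnd
  exact tupple_to_array_spec_aux t n hpre hnd

theorem tupple_to_array_changed : Claim_changed_tupple_to_array := by
  unfold Claim_changed_tupple_to_array; decide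

theorem tupple_to_array_tight : Claim_exact_tupple_to_array := by
  intro t n _ _ hd
  exact tight_aux t n hd.1 hd.2
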